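-- pv_equiv track=rewrite | github.com/Toto2002/2048 | 2048.py | collapseRow
-- ===== SOURCE A (Python) =====
-- def collapseRow(array):
--     newArray = []
--     newnewArray = []
--     Jibletsskip = False
--     for i in array:
--         if i != 0 :
--             newArray.append(i)
--     newArray.append(0)
--     for i in range(0,len(newArray)-1):
--         if Jibletsskip == False:
--             if newArray[i] == newArray[i+1]:
--                 newnewArray.append(newArray[i] + newArray[i+1])
--                 Jibletsskip = True
--             else:
--                 newnewArray.append(newArray[i])
--         else:
--             Jibletsskip = False
--     for i in range(0,len(array) - len(newnewArray)) :
--         newnewArray.append (0)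
--     return newnewArray
-- ===== SOURCE B (Python) =====
-- def collapseRow(array):
--     vals = [x for x in array if x != 0]
--     result = []
--     i = 0
--     n = len(vals)
--     while i < n:
--         v = vals[i]
--         j = i + 1
--         while j < n and vals[j] == v:
--             j += 1
--         c = j - i
--         result += [v + v] * (c // 2) + [v] * (c % 2)
--         i = j
--     return result + [0] * (len(array) - len(result))
-- ===== Notes on version B (the rewrite author's own statement) =====
-- stated objective: alternative
-- what changed: Replaces A's sentinel-plus-skip-flag pairwise index scan with run-length grouping: filter zeros, then for each maximal run of c equal values v emit c//2 merged tiles v+v and c%2 leftover v, then pad with zeros.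
import Mathlib
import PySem

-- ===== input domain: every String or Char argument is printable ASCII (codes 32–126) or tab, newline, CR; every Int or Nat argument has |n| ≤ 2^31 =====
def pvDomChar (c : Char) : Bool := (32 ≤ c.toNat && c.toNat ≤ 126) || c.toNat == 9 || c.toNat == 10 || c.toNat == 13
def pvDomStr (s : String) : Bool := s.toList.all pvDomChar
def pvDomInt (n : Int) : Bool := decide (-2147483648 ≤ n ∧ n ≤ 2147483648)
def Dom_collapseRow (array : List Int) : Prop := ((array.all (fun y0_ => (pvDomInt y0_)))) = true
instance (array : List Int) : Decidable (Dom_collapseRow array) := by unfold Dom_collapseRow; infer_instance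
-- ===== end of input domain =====

-- B replaces A's sentinel-plus-skip-flag pairwise index scan by run-length grouping
-- (for a maximal run of c copies of v emit c/2 merged tiles v+v then c%2 leftover v);
-- objective: alternative algorithm, same cost.

-- ===== PORT A =====
-- A's second loop 'for i in range(0, len(newArray)-1)' reads newArray[i], newArray[i+1]
-- and carries the skip flag; it is transcribed as structural recursion consuming one
-- element per iteration while peeking at the next (same state: the skip flag).
def pass2A : List Int → Bool → List Int
  | x :: y :: rest, skip =>
    if skip = false then
      if x == y then (x + y) :: pass2A (y :: rest) true
      else x :: pass2A (y :: rest) false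
    else pass2A (y :: rest) false
  | _, _ => []

def collapseRow (array : List Int) : List Int :=
  let newArray := (array.foldl (fun acc i => if i != 0 then acc ++ [i] else acc) []) ++ [0]
  let newnewArray := pass2A newArray false
  -- 'for i in range(0, len(array) - len(newnewArray)): newnewArray.append(0)'
  (PySem.List.pyRange 0 ((array.length : Int) - (newnewArray.length : Int)) 1).foldl
    (fun acc _ => acc ++ [0]) newnewArray

-- ===== PORT B =====
-- Source B's outer while loop over 'rest' with the inner run-counting while loop.
def mergeRuns : List Int → List Int
  | [] => []
  | v :: t =>
    -- c = 1 + length of the run of v at the head of t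
    let c := 1 + (t.takeWhile (fun x => x == v)).length
    List.replicate (c / 2) (v + v) ++ List.replicate (c % 2) v
      ++ mergeRuns (t.dropWhile (fun x => x == v))
termination_by l => l.length
decreasing_by
  exact Nat.lt_succ_of_le (t.length_dropWhile_le _)

def collapseRow_alt (array : List Int) : List Int :=
  let vals := array.filter (fun x => x != 0)
  let result := mergeRuns vals
  result ++ List.replicate (array.length - result.length) 0

-- ===== PRECONDITION & SPEC =====
def Spec_collapseRow (array : List Int) (out : List Int) : Prop := out = collapseRow_alt array
instance (array : List Int) (out : List Int) : Decidable (Spec_collapseRow array out) := by unfold Spec_collapseRow; infer_instance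

-- ===== CLAIM (what is proved, stated in full; the proofs are below) =====
def Claim_equal_collapseRow : Prop := ∀ (array : List Int), Dom_collapseRow array → Spec_collapseRow array (collapseRow array)

-- ===== LEMMAS AND PROOFS =====

-- A's first loop is List.filter
theorem foldl_filter_ne (array : List Int) (init : List Int) :
    array.foldl (fun acc i => if i != 0 then acc ++ [i] else acc) init
      = init ++ array.filter (fun x => x != 0) := by
  induction array generalizing init with
  | nil => simp
  | cons x t ih =>
    rw [List.foldl_cons, ih]
    by_cases h : x = 0
    · simp [h]
    · simp [h]

-- A's padding loop appends one 0 per range element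
theorem foldl_pad (l : List Int) (init : List Int) :
    l.foldl (fun acc _ => acc ++ [0]) init = init ++ List.replicate l.length 0 := by
  induction l generalizing init with
  | nil => simp
  | cons x t ih => rw [List.foldl_cons, ih]; simp [List.replicate_succ]

theorem mergeRuns_nil : mergeRuns [] = [] := by rw [mergeRuns]

theorem mergeRuns_cons (v : Int) (t : List Int) :
    mergeRuns (v :: t) =
      List.replicate ((1 + (t.takeWhile (fun x => x == v)).length) / 2) (v + v)
        ++ List.replicate ((1 + (t.takeWhile (fun x => x == v)).length) % 2) v
        ++ mergeRuns (t.dropWhile (fun x => x == v)) := by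
  rw [mergeRuns]

theorem mergeRuns_cons_cons (v : Int) (rest : List Int) :
    mergeRuns (v :: v :: rest) = (v + v) :: mergeRuns rest := by
  rw [mergeRuns_cons]
  simp only [List.takeWhile_cons, List.dropWhile_cons, beq_self_eq_true, if_true]
  cases rest with
  | nil => norm_num [mergeRuns_nil]
  | cons w rest' =>
    by_cases h : (w == v) = true
    · have hwv : w = v := eq_of_beq h
      subst hwv
      rw [mergeRuns_cons]
      simp only [List.takeWhile_cons, List.dropWhile_cons, beq_self_eq_true, if_true,
        List.length_cons]
      set t := (rest'.takeWhile (fun x => x == w)).length with ht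
      have h2 : (1 + (t + 1 + 1)) / 2 = (1 + t) / 2 + 1 := by omega
      have h3 : (1 + (t + 1 + 1)) % 2 = (1 + t) % 2 := by omega
      rw [h2, h3, List.replicate_succ]
      simp
    · simp [h, mergeRuns_cons]

theorem mergeRuns_cons_ne (x y : Int) (rest : List Int) (h : x ≠ y) :
    mergeRuns (x :: y :: rest) = x :: mergeRuns (y :: rest) := by
  rw [mergeRuns_cons]
  have hb : (y == x) = false := by simp [Ne.symm h]
  simp [hb]

-- the core equivalence: on a zero-free list, A's skip-flag pairwise pass over the
-- sentinel-terminated list equals B's run merging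
theorem pass2A_eq_mergeRuns : ∀ (n : ℕ) (L : List Int), L.length ≤ n →
    (∀ x ∈ L, x ≠ 0) → pass2A (L ++ [0]) false = mergeRuns L := by
  intro n
  induction n with
  | zero =>
    intro L hlen _
    have : L = [] := by cases L <;> simp_all
    subst this
    simp [pass2A, mergeRuns_nil]
  | succ n ih =>
    intro L hlen hz
    match L with
    | [] => simp [pass2A, mergeRuns_nil]
    | [x] =>
      have hx : x ≠ 0 := hz x (by simp)
      have hb : (x == (0 : Int)) = false := by simpa using hx
      simp [pass2A, hb, mergeRuns_cons, mergeRuns_nil]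
    | x :: y :: rest =>
      by_cases hxy : x = y
      · subst hxy
        have step : pass2A ((x :: x :: rest) ++ [0]) false
            = (x + x) :: pass2A ((x :: rest) ++ [0]) true := by
          simp [pass2A]
        have skipstep : pass2A ((x :: rest) ++ [0]) true = pass2A (rest ++ [0]) false := by
          cases rest with
          | nil => simp [pass2A]
          | cons w r => simp [pass2A]
        rw [step, skipstep, mergeRuns_cons_cons]
        rw [ih rest (by simp at hlen; omega) (fun a ha => hz a (by simp [ha]))]
      · have hb : (x == y) = false := by simp [hxy]
        have step : pass2A ((x :: y :: rest) ++ [0]) false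
            = x :: pass2A ((y :: rest) ++ [0]) false := by
          simp [pass2A, hb]
        rw [step, mergeRuns_cons_ne x y rest hxy]
        rw [ih (y :: rest) (by simp at hlen ⊢; omega)
          (fun a ha => hz a (by simp at ha ⊢; tauto))]

theorem length_pyRange_sub (a b : ℕ) :
    (PySem.List.pyRange 0 ((a : Int) - (b : Int)) 1).length = a - b := by
  rw [PySem.List.length_pyRange_one]
  omega

-- ===== VERDICT (by name: the statement is the Claim_ definition above) =====
theorem collapseRow_spec : Claim_equal_collapseRow := by
  intro array _
  unfold Spec_collapseRow
  simp only [collapseRow, collapseRow_alt]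
  rw [foldl_filter_ne]
  simp only [List.nil_append]
  have hz : ∀ x ∈ array.filter (fun x => x != 0), x ≠ 0 := by
    intro x hx
    simpa using List.of_mem_filter hx
  rw [pass2A_eq_mergeRuns (array.filter (fun x => x != 0)).length _ (le_refl _) hz]
  rw [foldl_pad, length_pyRange_sub]
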